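-- pv_equiv track=rewrite | github.com/boopdotpng/tenstorrent-python-driver | device_dispatch.py | _mcast_rects
-- ===== SOURCE A (Python) =====
-- def _mcast_rects(cores: list[tuple[int, int]]) -> list[tuple[int, int, int, int]]:
--   west = [(x, y) for x, y in cores if x < 8]
--   east = [(x, y) for x, y in cores if x >= 10]
--   rects = []
--   for group in (west, east):
--     if group:
--       xs = [x for x, _ in group]
--       ys = [y for _, y in group]
--       rects.append((min(xs), max(xs), min(ys), max(ys)))
--   return rects
-- ===== SOURCE B (Python) =====
-- def _mcast_rects(cores: list[tuple[int, int]]) -> list[tuple[int, int, int, int]]: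
--   w = e = None
--   for x, y in cores:
--     if x < 8:
--       w = (x, x, y, y) if w is None else (min(w[0], x), max(w[1], x), min(w[2], y), max(w[3], y))
--     elif x >= 10:
--       e = (x, x, y, y) if e is None else (min(e[0], x), max(e[1], x), min(e[2], y), max(e[3], y))
--   return [r for r in (w, e) if r is not None]
-- ===== Notes on version B (the rewrite author's own statement) =====
-- stated objective: alternative
-- what changed: Single pass over cores maintaining running (min_x,max_x,min_y,max_y) accumulators per group, instead of building filtered lists and rescanning each with min/max four times.
import Mathlib
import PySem

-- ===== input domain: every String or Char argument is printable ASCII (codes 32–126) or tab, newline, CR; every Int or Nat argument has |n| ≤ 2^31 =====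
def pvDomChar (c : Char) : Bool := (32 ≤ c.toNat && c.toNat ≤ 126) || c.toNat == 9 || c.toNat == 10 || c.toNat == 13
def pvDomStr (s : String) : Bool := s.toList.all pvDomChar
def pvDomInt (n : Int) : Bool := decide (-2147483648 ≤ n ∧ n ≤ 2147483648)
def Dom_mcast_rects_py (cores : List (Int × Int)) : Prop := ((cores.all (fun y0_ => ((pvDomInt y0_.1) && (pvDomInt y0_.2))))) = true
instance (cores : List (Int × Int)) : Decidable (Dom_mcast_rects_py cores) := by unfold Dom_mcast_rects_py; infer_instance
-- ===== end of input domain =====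

-- B is a single pass over cores keeping running min/max accumulators per group (alternative decomposition; no speed claim).

-- ===== PORT A =====
-- literal port of A: filter twice, then for each nonempty group take min/max of the projected lists
def mcast_rects_py (cores : List (Int × Int)) : List (Int × Int × Int × Int) :=
  let west := cores.filter (fun p => decide (p.1 < 8))
  let east := cores.filter (fun p => decide (10 ≤ p.1))
  [west, east].foldl (fun rects group =>
    if group ≠ [] then
      let xs := group.map (fun p => p.1)
      let ys := group.map (fun p => p.2)
      -- min/max on a nonempty Python list: PySem.List.min?/max? (the guard makes them `some`; getD 0 unreachable)
      rects ++ [((PySem.List.min? xs (fun v => v)).getD 0, (PySem.List.max? xs (fun v => v)).getD 0,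
                 (PySem.List.min? ys (fun v => v)).getD 0, (PySem.List.max? ys (fun v => v)).getD 0)]
    else rects) []

-- ===== PORT B =====
-- running-accumulator update for one core of a group
def pvUpd (acc : Option (Int × Int × Int × Int)) (x y : Int) : Option (Int × Int × Int × Int) :=
  match acc with
  | none => some (x, x, y, y)
  | some (a, b, c, d) => some (min a x, max b x, min c y, max d y)

def mcast_rects_py_alt (cores : List (Int × Int)) : List (Int × Int × Int × Int) :=
  let st := cores.foldl
    (fun (s : Option (Int × Int × Int × Int) × Option (Int × Int × Int × Int)) p =>
      if p.1 < 8 then (pvUpd s.1 p.1 p.2, s.2)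
      else if 10 ≤ p.1 then (s.1, pvUpd s.2 p.1 p.2)
      else s) (none, none)
  (match st.1 with | some r => [r] | none => []) ++
  (match st.2 with | some r => [r] | none => [])

-- ===== PRECONDITION & SPEC =====
def Spec_mcast_rects_py (cores : List (Int × Int)) (out : List (Int × Int × Int × Int)) : Prop := out = mcast_rects_py_alt cores
instance (cores : List (Int × Int)) (out : List (Int × Int × Int × Int)) : Decidable (Spec_mcast_rects_py cores out) := by unfold Spec_mcast_rects_py; infer_instance

-- ===== CLAIM (what is proved, stated in full; the proofs are below) =====
def Claim_equal_mcast_rects_py : Prop := ∀ (cores : List (Int × Int)), Dom_mcast_rects_py cores → Spec_mcast_rects_py cores (mcast_rects_py cores)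

-- ===== LEMMAS AND PROOFS =====

def pvG (acc : Option (Int × Int × Int × Int)) (p : Int × Int) : Option (Int × Int × Int × Int) :=
  pvUpd acc p.1 p.2

-- B's single pass splits into independent folds over the two filtered groups
theorem pv_split (cores : List (Int × Int)) (w e : Option (Int × Int × Int × Int)) :
    cores.foldl
      (fun (s : Option (Int × Int × Int × Int) × Option (Int × Int × Int × Int)) p =>
        if p.1 < 8 then (pvUpd s.1 p.1 p.2, s.2)
        else if 10 ≤ p.1 then (s.1, pvUpd s.2 p.1 p.2)
        else s) (w, e)
    = ((cores.filter (fun p => decide (p.1 < 8))).foldl pvG w,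
       (cores.filter (fun p => decide (10 ≤ p.1))).foldl pvG e) := by
  induction cores generalizing w e with
  | nil => rfl
  | cons p t ih =>
    by_cases h1 : p.1 < 8
    · have h2 : ¬ (10 ≤ p.1) := by omega
      simp [List.foldl, List.filter, h1, h2, ih, pvG]
    · by_cases h2 : 10 ≤ p.1 <;> simp [List.foldl, List.filter, h1, h2, ih, pvG]

theorem pv_acc_some (L : List (Int × Int)) (a b c d : Int) :
    L.foldl pvG (some (a, b, c, d)) =
      some ((L.map (fun p => p.1)).foldl min a, (L.map (fun p => p.1)).foldl max b,
            (L.map (fun p => p.2)).foldl min c, (L.map (fun p => p.2)).foldl max d) := by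
  induction L generalizing a b c d with
  | nil => rfl
  | cons p t ih => simp [List.foldl, pvG, pvUpd, ih]

theorem pv_group (L : List (Int × Int)) (hL : L ≠ []) :
    L.foldl pvG none =
      some ((PySem.List.min? (L.map (fun p => p.1)) (fun v => v)).getD 0,
            (PySem.List.max? (L.map (fun p => p.1)) (fun v => v)).getD 0,
            (PySem.List.min? (L.map (fun p => p.2)) (fun v => v)).getD 0,
            (PySem.List.max? (L.map (fun p => p.2)) (fun v => v)).getD 0) := by
  match L with
  | [] => exact absurd rfl hL
  | (x, y) :: t =>
    simp [List.foldl, pvG, pvUpd, pv_acc_some, List.map_cons,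
      PySem.List.min?_id_cons, PySem.List.max?_id_cons]

-- ===== VERDICT (by name: the statement is the Claim_ definition above) =====
theorem mcast_rects_py_spec : Claim_equal_mcast_rects_py := by
  intro cores _
  unfold Spec_mcast_rects_py mcast_rects_py mcast_rects_py_alt
  rw [pv_split]
  by_cases hw : cores.filter (fun p => decide (p.1 < 8)) = [] <;>
    by_cases he : cores.filter (fun p => decide (10 ≤ p.1)) = [] <;>
      simp [hw, he, pv_group, List.foldl_nil, List.foldl_cons]
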